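-- pv_equiv track=rewrite | github.com/zjunlp/OntoProtein | src/dataset.py | _split_go_by_type
-- ===== SOURCE A (Python) =====
-- from typing import Dict, List, Optional, Tuple, Union
--
-- def _split_go_by_type(go_types) -> Dict[str, List]:
--     component_go = []
--     function_go = []
--     process_go = []
--     for go_id, type_ in go_types.items():
--         if type_ == 'Process':
--             process_go.append(go_id)
--         elif type_ == 'Component':
--             component_go.append(go_id)
--         elif type_ == 'Function':
--             function_go.append(go_id)
--         else:
--             raise Exception('the type not supported.')
--
--     go_terms_type_dict = {
--         'Process': process_go,
--         'Component': component_go,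
--         'Function': function_go
--     }
--
--     return go_terms_type_dict
-- ===== SOURCE B (Python) =====
-- def _split_go_by_type(go_types):
--     allowed = ('Process', 'Component', 'Function')
--     if any(t not in allowed for t in go_types.values()):
--         raise Exception('the type not supported.')
--     return {t: [g for g, t2 in go_types.items() if t2 == t] for t in allowed}
-- ===== Notes on version B (the rewrite author's own statement) =====
-- stated objective: idiomatic
-- what changed: B replaces A's single accumulating pass with staged passes: one validation pass over the values, then a dict comprehension building each of the three lists by an independent filter pass.
import Mathlib
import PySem

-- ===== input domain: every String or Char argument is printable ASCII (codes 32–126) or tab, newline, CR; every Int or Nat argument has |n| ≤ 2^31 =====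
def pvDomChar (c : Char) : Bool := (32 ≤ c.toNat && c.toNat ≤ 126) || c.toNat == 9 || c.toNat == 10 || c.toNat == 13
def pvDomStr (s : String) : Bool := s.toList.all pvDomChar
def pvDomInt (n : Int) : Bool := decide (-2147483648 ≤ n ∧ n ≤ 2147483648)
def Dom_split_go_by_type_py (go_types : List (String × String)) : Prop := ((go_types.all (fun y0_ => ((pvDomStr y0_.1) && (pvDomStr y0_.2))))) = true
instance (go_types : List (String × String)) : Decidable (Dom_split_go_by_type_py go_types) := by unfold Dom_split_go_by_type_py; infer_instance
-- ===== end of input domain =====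

-- B replaces A's single accumulating pass with staged passes: validate all types first,
-- then build each of the three lists by an independent filter pass.

-- ===== PORT A =====
-- A's loop over go_types.items() maintaining the three local lists; `none` = the
-- `raise Exception('the type not supported.')` branch.
def splitLoopA : List (String × String) → List String → List String → List String →
    Option (List String × List String × List String)
  | [], component_go, function_go, process_go => some (component_go, function_go, process_go)
  | (go_id, type_) :: rest, component_go, function_go, process_go =>
    if type_ = "Process" then splitLoopA rest component_go function_go (process_go ++ [go_id])
    else if type_ = "Component" then splitLoopA rest (component_go ++ [go_id]) function_go process_go
    else if type_ = "Function" then splitLoopA rest component_go (function_go ++ [go_id]) process_go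
    else none

def split_go_by_type_py (go_types : List (String × String)) : List (String × List String) :=
  match splitLoopA go_types [] [] [] with
  | some (component_go, function_go, process_go) =>
      [("Process", process_go), ("Component", component_go), ("Function", function_go)]
  | none => []  -- unreachable under Pre_ (Python raises here)

-- ===== PORT B =====
def allowedTypes : List String := ["Process", "Component", "Function"]

-- [g for g, t2 in go_types.items() if t2 == t]
def filterType (go_types : List (String × String)) (t : String) : List String :=
  (go_types.filter (fun p => p.2 == t)).map (fun p => p.1)

def split_go_by_type_py_alt (go_types : List (String × String)) : List (String × List String) :=
  if go_types.any (fun p => !(allowedTypes.contains p.2)) then []  -- raise Exception(...)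
  else allowedTypes.map (fun t => (t, filterType go_types t))

-- ===== PRECONDITION & SPEC =====
-- Pre_ excludes exactly the inputs on which A (and B) raise Exception: some value
-- is not one of the three supported GO types.
def Pre_split_go_by_type_py (go_types : List (String × String)) : Prop :=
  ∀ p ∈ go_types, p.2 = "Process" ∨ p.2 = "Component" ∨ p.2 = "Function"
instance (go_types : List (String × String)) : Decidable (Pre_split_go_by_type_py go_types) := by
  unfold Pre_split_go_by_type_py; infer_instance

def pvWitness_split_go_by_type_py : (List (String × String)) :=
  [("GO:0008150", "Process"), ("GO:0005575", "Component"), ("GO:0003674", "Function")]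

def Spec_split_go_by_type_py (go_types : List (String × String)) (out : List (String × List String)) : Prop := out = split_go_by_type_py_alt go_types
instance (go_types : List (String × String)) (out : List (String × List String)) : Decidable (Spec_split_go_by_type_py go_types out) := by unfold Spec_split_go_by_type_py; infer_instance

-- ===== CLAIM =====
def Claim_equal_split_go_by_type_py : Prop := ∀ (go_types : List (String × String)), Dom_split_go_by_type_py go_types → Pre_split_go_by_type_py go_types → Spec_split_go_by_type_py go_types (split_go_by_type_py go_types)

-- ===== LEMMAS AND PROOFS =====

-- On valid inputs A's accumulating loop returns the three filters, appended to the
-- incoming accumulators.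
lemma splitLoopA_filter (rest : List (String × String)) (c f p : List String)
    (h : ∀ q ∈ rest, q.2 = "Process" ∨ q.2 = "Component" ∨ q.2 = "Function") :
    splitLoopA rest c f p =
      some (c ++ filterType rest "Component", f ++ filterType rest "Function",
            p ++ filterType rest "Process") := by
  induction rest generalizing c f p with
  | nil => simp [splitLoopA, filterType]
  | cons hd tl ih =>
    obtain ⟨go_id, type_⟩ := hd
    have htl : ∀ q ∈ tl, q.2 = "Process" ∨ q.2 = "Component" ∨ q.2 = "Function" := by
      intro q hq; exact h q (List.mem_cons_of_mem _ hq)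
    rcases h (go_id, type_) (List.mem_cons_self) with h1 | h1 | h1 <;> subst h1 <;>
      simp [splitLoopA, filterType, ih _ _ _ htl]

-- ===== VERDICT =====
theorem split_go_by_type_py_spec : Claim_equal_split_go_by_type_py := by
  intro go_types _ hpre
  unfold Spec_split_go_by_type_py split_go_by_type_py split_go_by_type_py_alt
  rw [splitLoopA_filter go_types [] [] [] hpre]
  have hany : go_types.any (fun p => !(allowedTypes.contains p.2)) = false := by
    apply List.any_eq_false.mpr
    intro p hp
    simp only [Bool.not_eq_true]
    rcases hpre p hp with h | h | h <;> simp [allowedTypes, h]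
  simp only [hany, Bool.false_eq_true, if_false]
  simp [allowedTypes]
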